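-- pv_equiv track=rewrite | github.com/sam1017/badou-mingqi | 7-白云嵩-西安/week3/cut_viterbi.py | generate_vocab
-- ===== SOURCE A (Python) =====
-- def generate_vocab(sentence,dict,max_len):
--     vocab = {}
--     if sentence == '':
--         return
--     else:
--         for i in range(len(sentence) - 1,-1,-1):
--             word = sentence[i]
--             vocab[i] = []
--             lens = min(max_len,len(sentence[:i+1]))
--             for j in range(lens):
--                 target = sentence[i-j:i+1]
--                 if target in dict.keys():
--                     vocab[i].append(i-j)
--     return vocab
-- ===== SOURCE B (Python) =====
-- def _occurrences(sentence, w):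
--     """All start indices of occurrences of w in sentence (ascending)."""
--     res = []
--     s = sentence.find(w)
--     while s != -1:
--         res.append(s)
--         s = sentence.find(w, s + 1)
--     return res
--
--
-- def generate_vocab(sentence, dict, max_len):
--     if sentence == '':
--         return
--     n = len(sentence)
--     ends = {}  # end index -> start indices of dictionary words ending there
--     for w in dict:
--         L = len(w)
--         if 1 <= L <= max_len:
--             for s in _occurrences(sentence, w):
--                 ends.setdefault(s + L - 1, []).append(s)
--     return {i: sorted(ends.get(i, []), reverse=True)
--             for i in range(n - 1, -1, -1)}
-- ===== Notes on version B (the rewrite author's own statement) =====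
-- stated objective: faster
-- what changed: A scans every substring ending at each position and tests dict membership (position-major); B iterates over the dictionary words once, locates each word's occurrences with str.find, buckets the start indices by end position, and sorts each bucket descending (word-major).
import Mathlib
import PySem

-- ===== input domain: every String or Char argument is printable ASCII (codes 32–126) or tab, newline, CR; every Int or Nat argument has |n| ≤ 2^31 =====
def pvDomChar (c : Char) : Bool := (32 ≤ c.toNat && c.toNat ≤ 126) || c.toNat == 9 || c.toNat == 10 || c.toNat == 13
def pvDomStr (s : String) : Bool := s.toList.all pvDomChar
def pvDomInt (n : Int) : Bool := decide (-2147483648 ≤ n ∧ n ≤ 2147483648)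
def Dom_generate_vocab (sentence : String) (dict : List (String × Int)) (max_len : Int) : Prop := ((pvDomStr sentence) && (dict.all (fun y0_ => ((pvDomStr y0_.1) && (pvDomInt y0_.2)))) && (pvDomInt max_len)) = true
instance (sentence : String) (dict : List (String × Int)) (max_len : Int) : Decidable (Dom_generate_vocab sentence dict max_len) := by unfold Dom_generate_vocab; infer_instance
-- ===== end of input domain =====

-- B rewrites A's per-position inner substring scan word-major: it finds each dictionary word's
-- occurrences once with str.find and buckets the start indices by end position (objective: faster,
-- measured).

-- ===== PORT A =====
def generate_vocab (sentence : String) (dict : List (String × Int)) (max_len : Int) : Option (List (Int × List Int)) :=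
  if sentence == "" then none
  else
    let cs := sentence.toList
    let vocab : PySem.Dict Int (List Int) :=
      (PySem.List.pyRange ((PySem.Str.len sentence) - 1) (-1) (-1)).foldl (fun vocab i =>
        -- Python computes word = sentence[i] but never uses it; i is always in range, so it never raises
        let vocab := vocab.insert i ([] : List Int)
        let lens := min max_len (PySem.Chars.len (PySem.Chars.slice cs none (some (i+1))))
        (PySem.List.pyRange 0 lens 1).foldl (fun vocab j =>
          let target := PySem.Chars.slice cs (some (i - j)) (some (i + 1))
          if dict.any (fun p => p.1.toList == target) then
            vocab.modify i [] (fun l => l ++ [i - j])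
          else vocab) vocab) PySem.Dict.empty
    some vocab.items

-- ===== PORT B =====
-- port of Source B's _occurrences (the str.find while-loop); the `cs.length < start` test is only a
-- totality guard: findFrom returns -1 there, Source B's loop has already stopped before such a start
def occList (cs w : List Char) (start : Nat) : List Int :=
  if _h : cs.length < start then []
  else
    let r := PySem.Chars.findFrom cs w (start : Int) none
    if hr : r = -1 then []
    else r :: occList cs w (r.toNat + 1)
termination_by cs.length + 1 - start
decreasing_by
  have hk : start ≤ cs.length := by omega
  have hspec := PySem.Chars.findFrom_natCast_spec cs w start hk (by simpa using hr)
  omega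

def generate_vocab_alt (sentence : String) (dict : List (String × Int)) (max_len : Int) : Option (List (Int × List Int)) :=
  if sentence == "" then none
  else
    let cs := sentence.toList
    let n : Int := PySem.Str.len sentence
    let ends : PySem.Dict Int (List Int) :=
      (PySem.List.dedup (dict.map (·.1))).foldl (fun d w =>
        let L : Int := PySem.Str.len w
        if 1 ≤ L ∧ L ≤ max_len then
          (occList cs w.toList 0).foldl (fun d s => d.modify (s + L - 1) [] (fun l => l ++ [s])) d
        else d) PySem.Dict.empty
    some ((PySem.List.pyRange (n - 1) (-1) (-1)).map (fun i =>
      (i, PySem.List.sorted (ends.getD i []) (fun x => x) true)))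

-- ===== PRECONDITION & SPEC =====
def Spec_generate_vocab (sentence : String) (dict : List (String × Int)) (max_len : Int) (out : Option (List (Int × List Int))) : Prop := out = generate_vocab_alt sentence dict max_len
instance (sentence : String) (dict : List (String × Int)) (max_len : Int) (out : Option (List (Int × List Int))) : Decidable (Spec_generate_vocab sentence dict max_len out) := by unfold Spec_generate_vocab; infer_instance

-- ===== CLAIM (what is proved, stated in full; the proofs are below) =====
def Claim_equal_generate_vocab : Prop := ∀ (sentence : String) (dict : List (String × Int)) (max_len : Int), Dom_generate_vocab sentence dict max_len → Spec_generate_vocab sentence dict max_len (generate_vocab sentence dict max_len)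

-- ===== LEMMAS AND PROOFS =====

def keyMatch (dict : List (String × Int)) (t : List Char) : Bool :=
  dict.any (fun p => p.1.toList == t)

def rowA (cs : List Char) (dict : List (String × Int)) (max_len : Int) (i : Int) : List Int :=
  ((PySem.List.pyRange 0 (min max_len (i+1)) 1).filter
      (fun j => keyMatch dict (PySem.Chars.slice cs (some (i - j)) (some (i + 1))))).map (fun j => i - j)

def hitsB (cs : List Char) (dict : List (String × Int)) (max_len : Int) : List (Int × Int) :=
  (PySem.List.dedup (dict.map (·.1))).flatMap (fun w =>
    if 1 ≤ (PySem.Str.len w) ∧ (PySem.Str.len w) ≤ max_len then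
      (occList cs w.toList 0).map (fun s => (s + (PySem.Str.len w) - 1, s))
    else [])

def rowLens (cs : List Char) (dict : List (String × Int)) (max_len : Int) (i : Int) : List Int :=
  ((PySem.List.pyRange 0 (min max_len (PySem.Chars.len (PySem.Chars.slice cs none (some (i+1))))) 1).filter
      (fun j => keyMatch dict (PySem.Chars.slice cs (some (i - j)) (some (i + 1))))).map (fun j => i - j)

def stepA (cs : List Char) (dict : List (String × Int)) (max_len : Int)
    (vocab : PySem.Dict Int (List Int)) (i : Int) : PySem.Dict Int (List Int) :=
  (PySem.List.pyRange 0 (min max_len (PySem.Chars.len (PySem.Chars.slice cs none (some (i+1))))) 1).foldl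
    (fun vocab j =>
      if keyMatch dict (PySem.Chars.slice cs (some (i - j)) (some (i + 1))) then
        vocab.modify i [] (fun l => l ++ [i - j])
      else vocab) (vocab.insert i ([] : List Int))

theorem occList_eq (cs w : List Char) (start : Nat) :
    occList cs w start =
      ((List.range' start (cs.length + 1 - start)).filter
        (fun p => decide (w <+: cs.drop p))).map (fun p : Nat => (p : Int)) := by
  rw [occList]
  by_cases h : cs.length < start
  · have h0 : cs.length + 1 - start = 0 := by omega
    simp [h, h0]
  · have hk : start ≤ cs.length := by omega
    simp only [h, dite_false]
    by_cases hr : PySem.Chars.findFrom cs w (start : Int) none = -1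
    · have hni := (PySem.Chars.findFrom_natCast_eq_neg_one_iff cs w start hk).mp hr
      have hnil : ((List.range' start (cs.length + 1 - start)).filter
          (fun p => decide (w <+: cs.drop p))) = [] := by
        rw [List.filter_eq_nil_iff]
        intro p hp
        simp only [List.mem_range'] at hp
        simp only [decide_eq_true_eq]
        intro hc
        refine hni ?_
        have hdd : cs.drop p = (cs.drop start).drop (p - start) := by
          rw [List.drop_drop]; congr 1; omega
        rw [hdd] at hc
        exact hc.isInfix.trans (List.drop_suffix _ _).isInfix
      simp [hr, hnil]
    · have hspec := PySem.Chars.findFrom_natCast_spec cs w start hk hr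
      set r := PySem.Chars.findFrom cs w (start : Int) none with hrdef
      have hr0 : 0 ≤ r := le_trans (by exact_mod_cast Nat.zero_le start) hspec.1
      have hrle : r ≤ (cs.length : Int) := by
        rw [hrdef, PySem.Chars.findFrom_natCast cs w start hk]
        split
        · omega
        · have := PySem.Chars.find_le_length (cs.drop start) w
          simp only [List.length_drop] at this
          omega
      have hrR : r = (r.toNat : Int) := (Int.toNat_of_nonneg hr0).symm
      have hsR : start ≤ r.toNat := by omega
      have hRle : r.toNat ≤ cs.length := by omega
      have hsplit : List.range' start (cs.length + 1 - start) =
          List.range' start (r.toNat - start) ++ List.range' r.toNat (cs.length + 1 - r.toNat) := by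
        rw [show cs.length + 1 - start = (r.toNat - start) + (cs.length + 1 - r.toNat) by omega,
          ← List.range'_append_1, Nat.add_sub_cancel' hsR]
      have hnil1 : (List.range' start (r.toNat - start)).filter (fun p => decide (w <+: cs.drop p)) = [] := by
        rw [List.filter_eq_nil_iff]
        intro p hp
        simp only [List.mem_range'] at hp
        simp only [decide_eq_true_eq]
        exact hspec.2.2 p (by omega) (by omega)
      have hcons : List.range' r.toNat (cs.length + 1 - r.toNat) =
          r.toNat :: List.range' (r.toNat + 1) (cs.length - r.toNat) := by
        rw [show cs.length + 1 - r.toNat = (cs.length - r.toNat) + 1 by omega, List.range'_succ]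
      have hIH := occList_eq cs w (r.toNat + 1)
      rw [show cs.length + 1 - (r.toNat + 1) = cs.length - r.toNat by omega] at hIH
      rw [hsplit, List.filter_append, hnil1, List.nil_append, hcons,
        List.filter_cons_of_pos (by simp [hspec.2.1]), List.map_cons, ← hIH, dif_neg hr, ← hrR]
termination_by cs.length + 1 - start
decreasing_by omega

theorem mem_occList (cs w : List Char) (s : Int) :
    s ∈ occList cs w 0 ↔ ∃ p : Nat, s = (p : Int) ∧ p ≤ cs.length ∧ w <+: cs.drop p := by
  rw [occList_eq]
  simp only [List.mem_map, List.mem_filter, List.mem_range'_1, decide_eq_true_eq]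
  constructor
  · rintro ⟨p, ⟨⟨hp1, hp2⟩, hpre⟩, rfl⟩
    exact ⟨p, rfl, by omega, hpre⟩
  · rintro ⟨p, rfl, hle, hpre⟩
    exact ⟨p, ⟨⟨by omega, by omega⟩, hpre⟩, rfl⟩

theorem nodup_occList (cs w : List Char) : (occList cs w 0).Nodup := by
  rw [occList_eq]
  exact List.Nodup.map (fun a b h => by exact_mod_cast h) (List.Nodup.filter _ List.nodup_range')

theorem set_update_of_mem {s : List Int} {l : List Int} (h : ∀ x ∈ l, x ∈ s) :
    PySem.Set.update s l = s := by
  induction l generalizing s with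
  | nil => rfl
  | cons x t ih =>
    have hx : PySem.Set.add s x = s := by
      simp [PySem.Set.add, PySem.Set.contains, h x (by simp)]
    show PySem.Set.update (PySem.Set.add s x) t = s
    rw [hx]
    exact ih (fun y hy => h y (by simp [hy]))

-- fold over if-guarded modifies at constant key i, as a pair-fold
theorem stepA_as_pairs (cs : List Char) (dict : List (String × Int)) (max_len : Int)
    (d : PySem.Dict Int (List Int)) (i : Int) :
    stepA cs dict max_len d i =
      (((PySem.List.pyRange 0 (min max_len (PySem.Chars.len (PySem.Chars.slice cs none (some (i+1))))) 1).filter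
          (fun j => keyMatch dict (PySem.Chars.slice cs (some (i - j)) (some (i + 1))))).map
        (fun j => (i, i - j))).foldl
        (fun d p => d.modify p.1 [] (fun l => l ++ [p.2])) (d.insert i ([] : List Int)) := by
  rw [stepA, List.foldl_map, List.foldl_filter]

theorem stepA_getD_self (cs : List Char) (dict : List (String × Int)) (max_len : Int)
    (d : PySem.Dict Int (List Int)) (i : Int) :
    (stepA cs dict max_len d i).getD i [] = rowLens cs dict max_len i := by
  rw [stepA_as_pairs, PySem.Dict.getD_foldl_modify_append, PySem.Dict.getD_insert_self,
    List.filter_map, rowLens]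
  simp [List.map_map, Function.comp_def]

theorem stepA_getD_ne (cs : List Char) (dict : List (String × Int)) (max_len : Int)
    (d : PySem.Dict Int (List Int)) (i k : Int) (hk : k ≠ i) :
    (stepA cs dict max_len d i).getD k [] = d.getD k [] := by
  rw [stepA_as_pairs, PySem.Dict.getD_foldl_modify_append, List.filter_map]
  have : ∀ j : Int, ((fun p : Int × Int => p.1 == k) ∘ (fun j => (i, i - j))) j = false := by
    intro j; simp [hk.symm]
  simp only [List.filter_congr (fun x _ => this x), List.filter_false, List.map_nil,
    List.append_nil]
  rw [PySem.Dict.getD_insert]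
  simp [hk]

theorem stepA_keys (cs : List Char) (dict : List (String × Int)) (max_len : Int)
    (d : PySem.Dict Int (List Int)) (i : Int) (h : d.contains i = false) :
    (stepA cs dict max_len d i).keys = d.keys ++ [i] := by
  rw [stepA_as_pairs, PySem.Dict.keys_foldl_modify_key, List.map_map]
  rw [set_update_of_mem, PySem.Dict.keys_insert_of_not_contains d _ h]
  intro x hx
  simp only [List.mem_map, Function.comp_def] at hx
  obtain ⟨j, _, rfl⟩ := hx
  rw [PySem.Dict.keys_insert_of_not_contains d _ h]
  simp

theorem stepA_contains (cs : List Char) (dict : List (String × Int)) (max_len : Int)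
    (d : PySem.Dict Int (List Int)) (i k : Int) (h : d.contains i = false) (hk : k ≠ i) :
    (stepA cs dict max_len d i).contains k = d.contains k := by
  have h1 : ((stepA cs dict max_len d i).contains k = true) ↔ (d.contains k = true) := by
    rw [PySem.Dict.contains_iff_mem_keys, PySem.Dict.contains_iff_mem_keys,
      stepA_keys cs dict max_len d i h]
    simp [hk]
  cases hdk : d.contains k with
  | true => exact h1.mpr hdk
  | false => exact Bool.eq_false_iff.mpr (fun hc => by simp [h1.mp hc] at hdk)

theorem outerA (cs : List Char) (dict : List (String × Int)) (max_len : Int) :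
    ∀ (l : List Int) (d : PySem.Dict Int (List Int)), l.Nodup →
      (∀ i ∈ l, d.contains i = false) →
      ((l.foldl (stepA cs dict max_len) d).keys = d.keys ++ l ∧
       ∀ k, (l.foldl (stepA cs dict max_len) d).getD k [] =
         if k ∈ l then rowLens cs dict max_len k else d.getD k []) := by
  intro l
  induction l with
  | nil => intro d _ _; simp
  | cons i t ih =>
    intro d hnd hfresh
    have hdi : d.contains i = false := hfresh i (by simp)
    have hfresh' : ∀ k ∈ t, (stepA cs dict max_len d i).contains k = false := by
      intro k hk
      have hki : k ≠ i := by rintro rfl; exact (List.nodup_cons.mp hnd).1 hk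
      rw [stepA_contains cs dict max_len d i k hdi hki]
      exact hfresh k (by simp [hk])
    obtain ⟨ihk, ihg⟩ := ih (stepA cs dict max_len d i) (List.nodup_cons.mp hnd).2 hfresh'
    constructor
    · rw [List.foldl_cons, ihk, stepA_keys cs dict max_len d i hdi, List.append_assoc]
      rfl
    · intro k
      rw [List.foldl_cons, ihg k]
      by_cases hkt : k ∈ t
      · simp [hkt]
      · by_cases hki : k = i
        · subst hki
          simp [hkt, stepA_getD_self]
        · simp [hkt, hki, stepA_getD_ne cs dict max_len d i k hki]

theorem rowLens_eq_rowA (cs : List Char) (dict : List (String × Int)) (max_len : Int) (i : Int)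
    (h0 : 0 ≤ i) (hn : i < (cs.length : Int)) :
    rowLens cs dict max_len i = rowA cs dict max_len i := by
  rw [rowLens, rowA]
  have h1 : PySem.Chars.len (PySem.Chars.slice cs none (some (i+1))) = i + 1 := by
    have hc : i + 1 = ((i.toNat + 1 : Nat) : Int) := by omega
    rw [hc]
    simp only [PySem.Chars.slice_eq_listSlice, PySem.List.slice_to_natCast, PySem.Chars.len_eq,
      List.length_take]
    omega
  rw [h1]

theorem generate_vocab_eq (sentence : String) (dict : List (String × Int)) (max_len : Int)
    (h : ¬ sentence = "") :
    generate_vocab sentence dict max_len =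
      some ((PySem.List.pyRange ((sentence.toList.length : Int) - 1) (-1) (-1)).map
        (fun i => (i, rowA sentence.toList dict max_len i))) := by
  have hlen : PySem.Str.len sentence = (sentence.toList.length : Int) := by
    simp [PySem.Str.len_eq]
  have hne : (sentence == "") = false := by simp [h]
  rw [generate_vocab]
  simp only [hne, Bool.false_eq_true, if_false, hlen]
  have hfold : ∀ (l : List Int) (d : PySem.Dict Int (List Int)),
      l.foldl (fun vocab i =>
        (PySem.List.pyRange 0 (min max_len (PySem.Chars.len (PySem.Chars.slice sentence.toList none (some (i+1))))) 1).foldl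
          (fun vocab j =>
            if dict.any (fun p => p.1.toList == PySem.Chars.slice sentence.toList (some (i - j)) (some (i + 1))) then
              vocab.modify i [] (fun l => l ++ [i - j])
            else vocab) (vocab.insert i ([] : List Int))) d
      = l.foldl (stepA sentence.toList dict max_len) d := by
    intro l d; rfl
  rw [hfold]
  set R := PySem.List.pyRange ((sentence.toList.length : Int) - 1) (-1) (-1) with hR
  have hRnodup : R.Nodup := by
    rw [hR, PySem.List.pyRange_neg_one]
    exact List.nodup_range.map (fun a b hab => by omega)
  obtain ⟨hkeys, hgetD⟩ := outerA sentence.toList dict max_len R PySem.Dict.empty hRnodup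
    (fun i _ => PySem.Dict.contains_empty i)
  have hkeys' : (R.foldl (stepA sentence.toList dict max_len) PySem.Dict.empty).keys = R := by
    rw [hkeys]; rfl
  have hnk : (R.foldl (stepA sentence.toList dict max_len) PySem.Dict.empty).keys.Nodup := by
    rw [hkeys']; exact hRnodup
  rw [PySem.Dict.items_eq_map_keys _ hnk ([] : List Int), hkeys']
  refine congrArg some (List.map_congr_left ?_)
  intro i hi
  have hmem : i ∈ R := hi
  have hbounds : -1 < i ∧ i ≤ (sentence.toList.length : Int) - 1 := by
    rw [hR, PySem.List.mem_pyRange_neg_one] at hmem; exact hmem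
  rw [hgetD i, if_pos hi, rowLens_eq_rowA sentence.toList dict max_len i (by omega) (by omega)]

theorem generate_vocab_alt_eq (sentence : String) (dict : List (String × Int)) (max_len : Int)
    (h : ¬ sentence = "") :
    generate_vocab_alt sentence dict max_len =
      some ((PySem.List.pyRange ((sentence.toList.length : Int) - 1) (-1) (-1)).map
        (fun i => (i, PySem.List.sorted
          (((hitsB sentence.toList dict max_len).filter (fun p => p.1 == i)).map (·.2))
          (fun x => x) true))) := by
  have hne : (sentence == "") = false := by simp [h]
  have hlen : PySem.Str.len sentence = (sentence.toList.length : Int) := by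
    simp [PySem.Str.len_eq]
  rw [generate_vocab_alt]
  simp only [hne, Bool.false_eq_true, if_false, hlen]
  refine congrArg some (List.map_congr_left ?_)
  intro i _
  have hends : ((PySem.List.dedup (dict.map (·.1))).foldl (fun d w =>
        if 1 ≤ (PySem.Str.len w) ∧ (PySem.Str.len w) ≤ max_len then
          (occList sentence.toList w.toList 0).foldl
            (fun d s => d.modify (s + (PySem.Str.len w) - 1) [] (fun l => l ++ [s])) d
        else d) PySem.Dict.empty)
      = (hitsB sentence.toList dict max_len).foldl
          (fun d p => d.modify p.1 [] (fun l => l ++ [p.2])) PySem.Dict.empty := by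
    have hstep : (fun (d : PySem.Dict Int (List Int)) w =>
        if 1 ≤ (PySem.Str.len w) ∧ (PySem.Str.len w) ≤ max_len then
          (occList sentence.toList w.toList 0).foldl
            (fun d s => d.modify (s + (PySem.Str.len w) - 1) [] (fun l => l ++ [s])) d
        else d)
      = (fun (d : PySem.Dict Int (List Int)) w =>
          (if 1 ≤ (PySem.Str.len w) ∧ (PySem.Str.len w) ≤ max_len then
            (occList sentence.toList w.toList 0).map (fun s => (s + (PySem.Str.len w) - 1, s))
          else []).foldl (fun d p => d.modify p.1 [] (fun l => l ++ [p.2])) d) := by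
      funext d w
      by_cases hP : 1 ≤ (PySem.Str.len w) ∧ (PySem.Str.len w) ≤ max_len
      · rw [if_pos hP, if_pos hP, List.foldl_map]
      · rw [if_neg hP, if_neg hP, List.foldl_nil]
    rw [hitsB, hstep, ← List.foldl_flatMap]
  rw [hends, PySem.Dict.getD_foldl_modify_append]
  rfl

theorem slice_eq_iff (cs t : List Char) (sN iN : Nat) (hn : iN < cs.length) :
    t = PySem.Chars.slice cs (some (sN:Int)) (some ((iN:Int)+1)) ↔
      (t <+: cs.drop sN ∧ t.length = iN + 1 - sN) := by
  have hcast : ((iN:Int)+1) = ((iN+1 : Nat):Int) := by push_cast; ring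
  rw [hcast, PySem.Chars.slice_eq_listSlice, PySem.List.slice_natCast]
  constructor
  · rintro rfl
    refine ⟨List.take_prefix _ _, ?_⟩
    rw [List.length_take, List.length_drop]; omega
  · rintro ⟨hpre, hleng⟩
    rw [List.prefix_iff_eq_take.mp hpre, hleng]

theorem row_eq (cs : List Char) (dict : List (String × Int)) (max_len : Int) (i : Int)
    (h0 : 0 ≤ i) (hn : i < (cs.length : Int)) :
    PySem.List.sorted (((hitsB cs dict max_len).filter (fun p => p.1 == i)).map (·.2))
      (fun x => x) true = rowA cs dict max_len i := by
  set words := PySem.List.dedup (dict.map (·.1)) with hwords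
  set fw := (fun w => if 1 ≤ (PySem.Str.len w) ∧ (PySem.Str.len w) ≤ max_len then
      (occList cs w.toList 0).filter (fun s => s + PySem.Str.len w - 1 == i) else []) with hfw
  have hS : ((hitsB cs dict max_len).filter (fun p => p.1 == i)).map (·.2) = words.flatMap fw := by
    rw [hitsB, List.filter_flatMap, List.map_flatMap]
    have hfun : (fun w : String => List.map (fun x : Int × Int => x.2) (List.filter (fun p : Int × Int => p.1 == i)
        (if 1 ≤ PySem.Str.len w ∧ PySem.Str.len w ≤ max_len then
          List.map (fun s => (s + PySem.Str.len w - 1, s)) (occList cs w.toList 0) else []))) = fw := by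
      funext w
      rw [hfw]
      by_cases hP : 1 ≤ (PySem.Str.len w) ∧ (PySem.Str.len w) ≤ max_len
      · simp only [if_pos hP, List.filter_map, List.map_map]
        simp [Function.comp_def]
      · simp only [if_neg hP, List.filter_nil, List.map_nil]
    rw [hfun]
  have hfw_mem : ∀ w s, s ∈ fw w ↔
      (1 ≤ PySem.Str.len w ∧ PySem.Str.len w ≤ max_len ∧
        s ∈ occList cs w.toList 0 ∧ s + PySem.Str.len w - 1 = i) := by
    intro w s
    rw [hfw]
    by_cases hP : 1 ≤ (PySem.Str.len w) ∧ (PySem.Str.len w) ≤ max_len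
    · simp [List.mem_filter]
      tauto
    · simp
      tauto
  have hdet : ∀ w s, s ∈ fw w →
      (0 ≤ s ∧ s ≤ i ∧ i - max_len < s ∧
        w.toList = PySem.Chars.slice cs (some s) (some (i+1))) := by
    intro w s hs
    obtain ⟨hL1, hL2, hocc, hend⟩ := (hfw_mem w s).mp hs
    obtain ⟨p, hsp, hple, hpre⟩ := (mem_occList cs w.toList s).mp hocc
    subst hsp
    have hlenw : PySem.Str.len w = (w.toList.length : Int) := by simp [PySem.Str.len_eq]
    rw [hlenw] at hL1 hL2 hend
    have hsle : (p : Int) ≤ i := by omega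
    have hml : i - max_len < (p : Int) := by omega
    refine ⟨by omega, hsle, hml, ?_⟩
    have hiN : i = (i.toNat : Int) := by omega
    have h1 : w.toList = PySem.Chars.slice cs (some ((p : Nat) : Int)) (some ((i.toNat : Int)+1)) := by
      rw [slice_eq_iff cs w.toList p i.toNat (by omega)]
      exact ⟨hpre, by omega⟩
    rw [h1, ← hiN]
  have hslice_len : ∀ s : Int, 0 ≤ s → s ≤ i →
      ((PySem.Chars.slice cs (some s) (some (i+1))).length : Int) = i + 1 - s := by
    intro s hs0 hsi
    have h1 : s = ((s.toNat : Nat) : Int) := by omega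
    have h2 : i + 1 = ((i.toNat + 1 : Nat) : Int) := by omega
    rw [h1, h2, PySem.Chars.slice_eq_listSlice, PySem.List.slice_natCast]
    rw [List.length_take, List.length_drop]
    push_cast
    omega
  have hmemS : ∀ s, s ∈ words.flatMap fw ↔
      (0 ≤ s ∧ s ≤ i ∧ i - max_len < s ∧
        keyMatch dict (PySem.Chars.slice cs (some s) (some (i+1))) = true) := by
    intro s
    rw [List.mem_flatMap]
    constructor
    · rintro ⟨w, hw, hs⟩
      obtain ⟨hb0, hb1, hb2, hsl⟩ := hdet w s hs
      refine ⟨hb0, hb1, hb2, ?_⟩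
      rw [hwords, PySem.List.mem_dedup, List.mem_map] at hw
      obtain ⟨pr, hpr, rfl⟩ := hw
      rw [keyMatch, List.any_eq_true]
      exact ⟨pr, hpr, by rw [← hsl]; exact beq_self_eq_true _⟩
    · rintro ⟨hb0, hb1, hb2, hkm⟩
      rw [keyMatch, List.any_eq_true] at hkm
      obtain ⟨pr, hpr, heq⟩ := hkm
      have heq' : pr.1.toList = PySem.Chars.slice cs (some s) (some (i+1)) := by
        simpa using heq
      refine ⟨pr.1, by rw [hwords, PySem.List.mem_dedup]; exact List.mem_map.mpr ⟨pr, hpr, rfl⟩, ?_⟩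
      have hlenw : PySem.Str.len pr.1 = (pr.1.toList.length : Int) := by simp [PySem.Str.len_eq]
      have hlen2 : (pr.1.toList.length : Int) = i + 1 - s := by
        rw [heq']; exact hslice_len s hb0 hb1
      rw [hfw_mem]
      have hiN : i = (i.toNat : Int) := by omega
      have hsN : s = (s.toNat : Int) := by omega
      have hpre : pr.1.toList <+: cs.drop s.toNat ∧ pr.1.toList.length = i.toNat + 1 - s.toNat := by
        rw [← slice_eq_iff cs pr.1.toList s.toNat i.toNat (by omega),
          show ((s.toNat : Nat) : Int) = s from hsN.symm,
          show ((i.toNat : Nat) : Int) = i from hiN.symm]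
        exact heq'
      refine ⟨by omega, by omega, ?_, by omega⟩
      rw [mem_occList]
      exact ⟨s.toNat, hsN, by omega, hpre.1⟩
  have hnodupS : (words.flatMap fw).Nodup := by
    rw [List.nodup_flatMap]
    constructor
    · intro w _
      by_cases hP : 1 ≤ (PySem.Str.len w) ∧ (PySem.Str.len w) ≤ max_len
      · have hfww : fw w = (occList cs w.toList 0).filter (fun s => s + PySem.Str.len w - 1 == i) := by
          rw [hfw]; simp only [if_pos hP]
        rw [hfww]; exact List.Nodup.filter _ (nodup_occList cs w.toList)
      · have hfww : fw w = [] := by rw [hfw]; simp only [if_neg hP]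
        rw [hfww]; exact List.nodup_nil
    · have hwnd : words.Nodup := by rw [hwords]; exact PySem.List.nodup_dedup (dict.map (·.1))
      refine List.Pairwise.imp ?_ hwnd
      intro w₁ w₂ hne s hs1 hs2
      have h1 := (hdet w₁ s hs1).2.2.2
      have h2 := (hdet w₂ s hs2).2.2.2
      exact hne (by
        have := h1.trans h2.symm
        exact String.toList_inj.mp this)
  have hpy : (PySem.List.pyRange 0 (min max_len (i+1)) 1).Pairwise (· < ·) := by
    rw [PySem.List.pyRange_of_pos 0 (min max_len (i+1)) (by norm_num)]
    exact List.pairwise_map.mpr (List.pairwise_lt_range.imp (fun {a b} hab => by omega))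
  have hrow_pw : (rowA cs dict max_len i).Pairwise (fun a b => b < a) := by
    rw [rowA]
    refine List.pairwise_map.mpr ?_
    exact (hpy.filter _).imp (fun hab => by omega)
  have hrow_mem : ∀ s, s ∈ rowA cs dict max_len i ↔
      (0 ≤ s ∧ s ≤ i ∧ i - max_len < s ∧
        keyMatch dict (PySem.Chars.slice cs (some s) (some (i+1))) = true) := by
    intro s
    rw [rowA]
    simp only [List.mem_map, List.mem_filter, PySem.List.mem_pyRange_one]
    constructor
    · rintro ⟨j, ⟨⟨hj0, hjm⟩, hkm⟩, rfl⟩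
      exact ⟨by omega, by omega, by omega, hkm⟩
    · rintro ⟨hs0, hsi, hml, hkm⟩
      refine ⟨i - s, ⟨⟨by omega, by omega⟩, ?_⟩, by omega⟩
      rw [show i - (i - s) = s by omega]
      exact hkm
  have hnodup_row : (rowA cs dict max_len i).Nodup :=
    hrow_pw.imp (fun hab => ne_of_gt hab)
  rw [hS]
  refine PySem.List.sorted_rev_eq_of_perm_of_pairwise_gt _ _ _ ?_ hrow_pw
  refine (List.perm_ext_iff_of_nodup hnodup_row hnodupS).mpr ?_
  intro s
  rw [hrow_mem s, hmemS s]

-- ===== VERDICT (by name: the statement is the Claim_ definition above) =====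
theorem generate_vocab_spec : Claim_equal_generate_vocab := by
  intro sentence dict max_len _
  unfold Spec_generate_vocab
  by_cases h : sentence = ""
  · subst h; rfl
  · rw [generate_vocab_eq sentence dict max_len h, generate_vocab_alt_eq sentence dict max_len h]
    refine congrArg some (List.map_congr_left ?_)
    intro i hi
    rw [PySem.List.mem_pyRange_neg_one] at hi
    exact congrArg (fun r => (i, r)) (row_eq sentence.toList dict max_len i (by omega) (by omega)).symm
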